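/- GENERATED by mk_final_copies.py from the proof of the farm's unit `start_decoder.2a` (farm:start_decoder.2a.1: Proof.lean) as the
   re-elaboration sweep compiled it — do not edit. -/
import Asan.CheckWalk
import Vorbis.Spec.StartDecoderATest
import Vorbis.Spec.StartDecoderBTest
import Vorbis.Spec.Reader
import Vorbis.Spec.Units.start_decoder_2a

open X86 X86.User Asan Vorbis Vorbis.Spec Vorbis.Spec.StartDecoder Vorbis.Spec.StartDecoder.P2

namespace Vorbis.Spec.start_decoder_2a

/-- The windows of stage A (the segment's own stores and start_page's footprint), as a literal list over the steady stack pointer: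
none is read by `Frame`. -/
theorem stageWins_frame (g : Ghost) (geo : Geo g) :
    ∀ w, w ∈ [(⟨g.R - 408, g.R⟩ : Span), ⟨g.f + 1749, g.f + 1750⟩,
      ⟨g.f + 48, g.f + 56⟩, ⟨g.f + 84, g.f + 96⟩, ⟨g.f + 136, g.f + 144⟩, ⟨g.f + 1484, g.f + 1748⟩,
      ⟨g.f + 1752, g.f + 1756⟩, ⟨g.f + 1776, g.f + 1784⟩] → FrameWin g w := by
  obtain ⟨r1, r2, a2, a3, hobj, hlo, hhi, _⟩ := geo
  intro w hw
  simp only [List.mem_cons, List.mem_nil_iff, or_false] at hw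
  unfold FrameWin
  rcases hw with rfl | rfl | rfl | rfl | rfl | rfl | rfl | rfl <;> simp only [] <;> omega

set_option maxRecDepth 4000 in
set_option maxHeartbeats 4000000 in
/-- **Segment `.2a`** (0x113a2b … 0x113a41, lines 3614 – 3616): the checked store `f->first_decode = TRUE` and `call start_page`; from
`Body2` to `Body2b` (a point `Pt` at `cut2`, the return of start_page, with eax ∈ {0, 1} and, for eax = 1, `next_seg = 0`). -/
theorem seg2a {Lay : Layout} (hLay : Lay.hi = 0x1000000) {μ : Microarch} (hμ : UserX.MicroOK μ) {u₀ : State}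
    (hcode : HasCodeNat Lay u₀ Vorbis.L.start_decoder.entry Vorbis.Code.code_start_decoder.nat Vorbis.L.start_decoder.size)
    (hst1 : Asan.SmallCheck Lay μ Vorbis.WayInv (Vorbis.CodeOK u₀) [.rax, .rdx] 1 Vorbis.L.__asan_store1_noabort.entry)
    (hsp : ∀ (others : List Obj) (frames : List (Nat × FrameLayout)) (Blk : Block → Prop) (len : Nat),
      Calls Lay μ Vorbis.WayInv (Vorbis.conv u₀) Vorbis.L.start_page.entry (Vorbis.Spec.start_page.spec others frames Blk len))
    {g : Ghost} {A : Arena × List Obj} {v : State} (hb : Body2 u₀ g A v) :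
    ReachVia Lay μ Vorbis.WayInv v (fun w => Body2b u₀ g A w) := by
  have hbody := hb
  obtain ⟨hfr, hhand, hrbp, hrdi, hp3⟩ := hb
  have geo : Geo g := geo_of hfr hhand hp3.env.ok hp3.bits
  obtain ⟨gr, gr8, glo, ghi, gobj, gobjLo, gobjHi, glog⟩ := geo
  have w_rip := hfr.rip
  have hRn : (v.reg .rsp).toNat = g.R := by
    rw [hfr.rsp]
    exact toNat_addr _ (by omega)
  have haf : (addr g.f).toNat = g.f := toNat_addr _ (by omega)
  have w_eq : Mem.EqOn Vorbis.L.textLo Vorbis.L.textHi u₀.mem v.mem := hfr.code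
  have hdf : v.flags .df = false := (show abiInv _ from hfr.inv).1
  have hmx : v.mxcsr &&& 0x1F80 = 0x1F80 := (show abiInv _ from hfr.inv).2
  have hsse := Vorbis.sseOK_of_abiInv hfr.inv
  have hsp' := hsp A.2 g.frames' (g.Blk A) g.len
  have hL : BlkLive (g.Blk A) (Live (stackObjs g.frames' ++ A.2)) := hp3.env.live
  have hbits0 : Bits (g.Blk A) g.len v.mem g.f := hp3.bits
  u_walk hcode [hμ.vendor] span [Vorbis.L.textLo, Vorbis.L.textHi] side (v_side)
  · -- 0x113a32, store1 [f + 1749] (`f->first_decode`): a field of `*f`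
    have hun : ShadowUntouched v.mem s_113a32.mem := by v_untouched
    have hs := hbits0.site_field hL 1749 1 (by omega) (by omega) rfl
    exact Vorbis.Spec.check_site hfr.shadow hun hs (by u_omega)
  · -- call_inv
    v_inv
  · -- start_page's precondition
    have hun : ShadowUntouched v.mem s_113a41.mem := by v_untouched
    have hso : Mem.SameExcept [⟨(v.reg .rsp).toNat - 408, (v.reg .rsp).toNat⟩, ⟨(v.reg .rsp).toNat + 16, (v.reg .rsp).toNat + 17⟩,
        ⟨(v.reg .rsp).toNat + 32, (v.reg .rsp).toNat + 36⟩, ⟨g.f + 1749, g.f + 1750⟩, ⟨g.f + 136, g.f + 144⟩]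
        v.mem s_113a41.mem := by
      u_same
    rw [hRn] at hso
    have geo' : Geo g := ⟨gr, gr8, glo, ghi, gobj, gobjLo, gobjHi, glog⟩
    obtain ⟨hb1, hn1⟩ := own_stores geo' hbits0 hso (ownWins_ok g geo')
    have e : (s_113a41.reg .rdi).toNat = g.f := by
      rw [w_rdi]
      exact haf
    refine ⟨⟨shadowPre_call hfr ?_ hun, ?_, ?_⟩, ?_⟩
    · rw [w_rsp]
      u_omega
    · rw [e]
      exact readerEnv hhand hp3.env.live
    · rw [e]
      exact hb1
    · rw [e]
      right
      rw [hn1]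
      exact p3_next_seg hp3
  · -- the return of start_page: the point at cut2
    v_after_call w_rsp_113a41 w_mem_113a41
    simp only [w_rdi_113a41, haf] at w_same
    have geo' : Geo g := ⟨gr, gr8, glo, ghi, gobj, gobjLo, gobjHi, glog⟩
    have hpost : StartPagePost (g.Blk A) g.len (s_113a41.reg .rdi).toNat s_113a41 s_113a41r := w_post
    have e : (s_113a41.reg .rdi).toNat = g.f := by
      rw [w_rdi_113a41]
      exact haf
    rw [e] at hpost
    -- the byte just stored
    have hfirst : stb_vorbis.first_decode s_113a41.mem g.f = 1 := by
      simp only [vacc, voff]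
      rw [w_mem_113a41, Vorbis.addr_add_lit]
      rw [Mem.u8_writeLE _ _ 8 _ _ (by u_omega) (by omega) (by u_omega)]
      exact Mem.u8_writeLE_same _ _ _
    have hun1 : ShadowUntouched v.mem s_113a41.mem := by v_untouched
    have hun : ShadowUntouched v.mem s_113a41r.mem := by v_untouched
    -- the three footprints (each `u_same` in a scope of its own: it takes the latest `SameExcept` of the context)
    obtain ⟨hs, hs1, hs2⟩ :
        Mem.SameExcept [⟨(v.reg .rsp).toNat - 408, (v.reg .rsp).toNat⟩, ⟨g.f + 1749, g.f + 1750⟩,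
          ⟨g.f + 48, g.f + 56⟩, ⟨g.f + 84, g.f + 96⟩, ⟨g.f + 136, g.f + 144⟩, ⟨g.f + 1484, g.f + 1748⟩,
          ⟨g.f + 1752, g.f + 1756⟩, ⟨g.f + 1776, g.f + 1784⟩] v.mem s_113a41r.mem ∧
        Mem.SameExcept [⟨(v.reg .rsp).toNat - 408, (v.reg .rsp).toNat⟩, ⟨(v.reg .rsp).toNat + 16, (v.reg .rsp).toNat + 17⟩,
          ⟨(v.reg .rsp).toNat + 32, (v.reg .rsp).toNat + 36⟩, ⟨g.f + 1749, g.f + 1750⟩, ⟨g.f + 136, g.f + 144⟩]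
          v.mem s_113a41.mem ∧
        Mem.SameExcept [⟨(v.reg .rsp).toNat - 408, (v.reg .rsp).toNat⟩, ⟨(v.reg .rsp).toNat + 16, (v.reg .rsp).toNat + 17⟩,
          ⟨(v.reg .rsp).toNat + 32, (v.reg .rsp).toNat + 36⟩, ⟨(v.reg .rsp).toNat + 160, (v.reg .rsp).toNat + 166⟩,
          ⟨g.f + 48, g.f + 56⟩, ⟨g.f + 84, g.f + 96⟩, ⟨g.f + 136, g.f + 144⟩, ⟨g.f + 1484, g.f + 1748⟩,
          ⟨g.f + 1752, g.f + 1756⟩, ⟨g.f + 1776, g.f + 1784⟩] s_113a41.mem s_113a41r.mem := by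
      refine ⟨?_, ?_, ?_⟩
      · u_same
      · u_same
      · rw [w_mem_113a41]
        u_same
    rw [hRn] at hs hs1 hs2
    have hpt : Pt u₀ g A Vorbis.L.start_decoder.cut2 s_113a41r :=
      Pt.of_body2 hbody w_rip w_rsp (w_kept.get .rbp rfl) w_eq w_inv hs (stageWins_frame g geo') hun hs1 (ownWins_ok g geo') hun1
        hfirst hs2 (allWins_ok g geo') hpost.untouched hpost.reader.bits
    exact ReachVia.done ⟨hpt, hpost.result, fun h => (hpost.started h).1⟩

end Vorbis.Spec.start_decoder_2a

/-- Unit `start_decoder.2a`: segment 2a of `start_decoder` takes `Body2` to `Body2b`. -/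
theorem Vorbis.Spec.Worked.start_decoder_2a_ok : Vorbis.Spec.start_decoder_2a.Statement := by
  intro Lay hLay μ hμ u₀ hcode hst1 hsp g A v hb
  exact Vorbis.Spec.start_decoder_2a.seg2a hLay hμ hcode hst1 hsp hb
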